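-- pv_equiv track=rewrite | github.com/xogusrns123/advance-spec | simulation/scripts/compute_method_depth_rates.py | _walk_extension_for_kt
-- ===== SOURCE A (Python) =====
-- from typing import Dict, List, Optional, Tuple
--
-- def _walk_extension_for_kt(tids: List[int], pids: List[int],
--                             coords: List[Tuple[int, int]],
--                             gt: list) -> Tuple[int, int]:
--     """Greedy walk on the (no-dedup) extension tree. Returns (k, tau):
--       k   = consecutive backbone (e == 0) matches from root.
--       tau = subsequent graft (e >= 1) matches once the walk leaves the
--             backbone. Total accepted = k + tau.
--
--     Tie-break: base nodes are inserted first into the extension tree by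
--     ``_build_extension_tree``, so when iterating children-by-parent in
--     insertion order, backbone children are tried before graft children
--     (greedy walk follows backbone preferentially when both match)."""
--     if not tids or not gt:
--         return 0, 0
--     children_by_p: Dict[int, List[int]] = {}
--     for i, p in enumerate(pids):
--         children_by_p.setdefault(p, []).append(i)
--     cur = -1
--     k = 0
--     tau = 0
--     in_backbone = True
--     for gt_tok in gt:
--         cands = children_by_p.get(cur, [])
--         matched = -1
--         for c in cands:
--             if tids[c] == gt_tok:
--                 matched = c
--                 break
--         if matched < 0:
--             break
--         b, e = coords[matched]
--         if e == 0 and in_backbone: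
--             k += 1
--         else:
--             in_backbone = False
--             tau += 1
--         cur = matched
--     return k, tau
-- ===== SOURCE B (Python) =====
-- def _walk_extension_for_kt(tids, pids, coords, gt):
--     """No parent-index version: each step finds its node by a direct
--     first-match linear scan over the zipped node table, recording the
--     e-trace; (k, tau) is then a right-to-left fold over that trace
--     (a zero extends the backbone run, a nonzero turns everything from
--     it onward into grafts)."""
--     if not tids or not gt:
--         return 0, 0
--     nodes = list(zip(pids, tids, coords))
--     es = []
--     cur = -1
--     for tok in gt:
--         for i, (p, t, (b, e)) in enumerate(nodes):
--             if p == cur and t == tok: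
--                 es.append(e)
--                 cur = i
--                 break
--         else:
--             break
--     k = tau = 0
--     for e in reversed(es):
--         if e == 0:
--             k += 1
--         else:
--             k, tau = 0, 1 + k + tau
--     return k, tau
-- ===== Notes on version B (the rewrite author's own statement) =====
-- stated objective: alternative
-- what changed: B drops the parent->children dict entirely: each walk step finds its node by a first-match linear scan over the zipped (pid, tid, coord) node table, recording the e-trace, and (k, tau) is obtained by a right-to-left fold over that trace instead of threading k/tau/in_backbone state through one loop; skipping the full index build makes B faster when the walk visits few nodes (as measured).
-- outside the precondition, e.g. on _walk_extension_for_kt([1], [-1, 0], [(0, 0)], [2]): A returns (0, 0), B returns (0, 0)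
import Mathlib
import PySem

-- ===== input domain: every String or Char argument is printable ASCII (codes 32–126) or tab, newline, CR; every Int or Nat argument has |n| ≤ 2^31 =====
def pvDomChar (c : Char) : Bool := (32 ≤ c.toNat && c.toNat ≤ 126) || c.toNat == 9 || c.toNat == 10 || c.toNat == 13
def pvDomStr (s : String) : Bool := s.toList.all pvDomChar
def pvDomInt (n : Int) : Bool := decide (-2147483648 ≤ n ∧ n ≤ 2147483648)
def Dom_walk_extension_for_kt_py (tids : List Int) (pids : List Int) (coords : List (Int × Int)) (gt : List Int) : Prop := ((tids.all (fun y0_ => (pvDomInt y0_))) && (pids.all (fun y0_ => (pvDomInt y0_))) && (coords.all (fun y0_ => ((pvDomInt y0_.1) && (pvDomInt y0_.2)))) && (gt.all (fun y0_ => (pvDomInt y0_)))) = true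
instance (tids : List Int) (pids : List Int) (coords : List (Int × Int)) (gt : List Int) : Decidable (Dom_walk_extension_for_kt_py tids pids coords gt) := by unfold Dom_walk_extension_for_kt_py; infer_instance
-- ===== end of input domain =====

-- B drops the parent->children dict (direct first-match scan over the zipped node table) and derives (k,tau) by a right-to-left fold over the e-trace; skipping the index build was measured faster in a timing run.


-- ===== PORT A =====
-- children_by_p: 'children_by_p.setdefault(p, []).append(i)' over enumerate(pids)
def pvBuildChildren (pids : List Int) : PySem.Dict Int (List Int) :=
  (PySem.List.enumerate pids).foldl
    (fun d ip => d.modify ip.2 [] (· ++ [ip.1])) PySem.Dict.empty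

-- A's inner scan: 'for c in cands: if tids[c] == gt_tok: matched = c; break'.
-- tids[c] out of range is an IndexError in Python — unreachable under Pre_; this port skips such a candidate.
def pvFindMatchA (tids : List Int) (cands : List Int) (tok : Int) : Option Int :=
  match cands with
  | [] => none
  | c :: rest =>
    match PySem.List.pyGet? tids c with
    | none => pvFindMatchA tids rest tok
    | some t => if t = tok then some c else pvFindMatchA tids rest tok

-- the 'for gt_tok in gt' loop of A, with state (cur, k, tau, in_backbone); 'break' = return (k, tau)
-- (coords[matched] out of range is an IndexError in Python — unreachable under Pre_; we stop there)
def pvWalkA (children : PySem.Dict Int (List Int)) (tids : List Int) (coords : List (Int × Int)) :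
    List Int → Int → Int → Int → Bool → Int × Int
  | [], _, k, tau, _ => (k, tau)
  | tok :: rest, cur, k, tau, inb =>
    match pvFindMatchA tids (children.getD cur []) tok with
    | none => (k, tau)
    | some c =>
      match PySem.List.pyGet? coords c with
      | none => (k, tau)
      | some be =>
        if be.2 = 0 ∧ inb = true then pvWalkA children tids coords rest c (k + 1) tau inb
        else pvWalkA children tids coords rest c k (tau + 1) false

def walk_extension_for_kt_py (tids : List Int) (pids : List Int) (coords : List (Int × Int)) (gt : List Int) : Int × Int :=
  if tids = [] ∨ gt = [] then (0, 0)
  else pvWalkA (pvBuildChildren pids) tids coords gt (-1) 0 0 true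

-- ===== PORT B =====
-- Source B's inner 'for i, (p, t, (b, e)) in enumerate(nodes): if p == cur and t == tok: … break'
-- returning the matched index and its e-value (the for-else 'break' = none)
def pvFindNode : List (Int × Int × Int × Int) → Int → Int → Int → Option (Int × Int)
  | [], _, _, _ => none
  | n :: rest, i, cur, tok =>
    if n.1 = cur ∧ n.2.1 = tok then some (i, n.2.2.2)
    else pvFindNode rest (i + 1) cur tok

-- pass 1 of Source B: the walk over gt collecting the e-trace (es.append(e); cur = i)
def pvCollectB (nodes : List (Int × Int × Int × Int)) : List Int → Int → List Int
  | [], _ => []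
  | tok :: rest, cur =>
    match pvFindNode nodes 0 cur tok with
    | none => []
    | some ie => ie.2 :: pvCollectB nodes rest ie.1

-- pass 2 of Source B: one step of the 'for e in reversed(es)' fold
def pvStepKT (kt : Int × Int) (e : Int) : Int × Int :=
  if e = 0 then (kt.1 + 1, kt.2) else (0, 1 + kt.1 + kt.2)

def walk_extension_for_kt_py_alt (tids : List Int) (pids : List Int) (coords : List (Int × Int)) (gt : List Int) : Int × Int :=
  if tids = [] ∨ gt = [] then (0, 0)
  else
    let nodes := pids.zip (tids.zip coords)
    let es := pvCollectB nodes gt (-1)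
    es.reverse.foldl pvStepKT (0, 0)

-- ===== PRECONDITION & SPEC =====
-- Pre_ admits the parallel-array shape the caller guarantees (tids/pids/coords index the same
-- nodes) plus the inputs where the walk provably never indexes (empty tids/gt, or no root child
-- -1 in pids): outside it A can raise IndexError on tids[c] or coords[matched]; it also excludes
-- some mismatched-length inputs on which A happens to return because the walk dead-ends later.
def Pre_walk_extension_for_kt_py (tids : List Int) (pids : List Int) (coords : List (Int × Int)) (gt : List Int) : Prop :=
  tids = [] ∨ gt = [] ∨ (-1 : Int) ∉ pids ∨ (pids.length ≤ tids.length ∧ pids.length ≤ coords.length)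
instance (tids : List Int) (pids : List Int) (coords : List (Int × Int)) (gt : List Int) : Decidable (Pre_walk_extension_for_kt_py tids pids coords gt) := by unfold Pre_walk_extension_for_kt_py; infer_instance

def pvWitness_walk_extension_for_kt_py : List Int × List Int × (List (Int × Int)) × List Int :=
  ([5, 6, 7], [-1, 0, 0], [(0, 0), (1, 0), (1, 1)], [5, 7])

def Spec_walk_extension_for_kt_py (tids : List Int) (pids : List Int) (coords : List (Int × Int)) (gt : List Int) (out : Int × Int) : Prop := out = walk_extension_for_kt_py_alt tids pids coords gt
instance (tids : List Int) (pids : List Int) (coords : List (Int × Int)) (gt : List Int) (out : Int × Int) : Decidable (Spec_walk_extension_for_kt_py tids pids coords gt out) := by unfold Spec_walk_extension_for_kt_py; infer_instance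

-- ===== CLAIM (what is proved, stated in full; the proofs are below) =====
def Claim_equal_walk_extension_for_kt_py : Prop := ∀ (tids : List Int) (pids : List Int) (coords : List (Int × Int)) (gt : List Int), Dom_walk_extension_for_kt_py tids pids coords gt → Pre_walk_extension_for_kt_py tids pids coords gt → Spec_walk_extension_for_kt_py tids pids coords gt (walk_extension_for_kt_py tids pids coords gt)

-- ===== LEMMAS AND PROOFS =====

-- the right fold pass 2 computes (foldl over the reversed trace = foldr over the trace)
def pvG (es : List Int) : Int × Int := es.foldr (fun e kt => pvStepKT kt e) (0, 0)

theorem pvG_sum (es : List Int) : (pvG es).1 + (pvG es).2 = (es.length : Int) := by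
  induction es with
  | nil => simp [pvG]
  | cons e rest ih =>
    simp only [pvG, List.foldr_cons, pvStepKT] at *
    split_ifs <;> simp <;> omega

-- Characterization of the children dict: bucket c holds the indices i with pids[i] = c, in order.
theorem pvBuild_aux (l : List (Int × Int)) (d : PySem.Dict Int (List Int)) (c : Int) :
    (l.foldl (fun d ip => d.modify ip.2 [] (· ++ [ip.1])) d).getD c []
      = d.getD c [] ++ (l.filter (fun ip => ip.2 == c)).map (·.1) := by
  induction l generalizing d with
  | nil => simp
  | cons p rest ih =>
    simp only [List.foldl_cons, ih, List.filter_cons]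
    by_cases h : p.2 = c
    · simp [h]
    · simp [PySem.Dict.getD_modify, h, Ne.symm h]

theorem pvBuildChildren_getD (pids : List Int) (c : Int) :
    (pvBuildChildren pids).getD c []
      = ((PySem.List.enumerate pids).filter (fun ip => ip.2 == c)).map (·.1) := by
  unfold pvBuildChildren
  rw [pvBuild_aux]
  simp

-- A's bucket scan followed by its coords lookup, packaged (proof-side helper)
def pvComb (coords : List (Int × Int)) (o : Option Int) : Option (Int × Int) :=
  match o with
  | none => none
  | some c => (PySem.List.pyGet? coords c).map (fun be => (c, be.2))

-- The key bridge: A's bucket scan followed by its coords lookup finds exactly the node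
-- (index, e-value) that B's direct scan over the zipped node table finds.
theorem pvFind_eq (tids : List Int) (coords : List (Int × Int)) (cur tok : Int) :
    ∀ (ps ts : List Int) (cs : List (Int × Int)) (s : Nat),
      ps.length ≤ ts.length → ps.length ≤ cs.length →
      (∀ j, j < ps.length → PySem.List.pyGet? tids (((s + j : Nat) : Int)) = ts[j]?) →
      (∀ j, j < ps.length → PySem.List.pyGet? coords (((s + j : Nat) : Int)) = cs[j]?) →
      pvComb coords (pvFindMatchA tids (((PySem.List.enumerate ps (s : Int)).filter (fun ip => ip.2 == cur)).map (·.1)) tok)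
        = pvFindNode (ps.zip (ts.zip cs)) ((s : Nat) : Int) cur tok := by
  intro ps
  induction ps with
  | nil => intro ts cs s _ _ _ _; simp [pvComb, pvFindMatchA, pvFindNode, PySem.List.enumerate_nil]
  | cons p ps' ih =>
    intro ts cs s hts hcs htid hcoord
    cases ts with
    | nil => simp at hts
    | cons t ts' =>
      cases cs with
      | nil => simp at hcs
      | cons c0 cs' =>
        have ht0 : PySem.List.pyGet? tids ((s : Nat) : Int) = some t := by
          have := htid 0 (by simp); simpa using this
        have hc0 : PySem.List.pyGet? coords ((s : Nat) : Int) = some c0 := by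
          have := hcoord 0 (by simp); simpa using this
        have hrec := ih ts' cs' (s + 1) (by simpa using hts) (by simpa using hcs)
          (fun j hj => by have := htid (j + 1) (by simpa using hj); simpa [Nat.add_assoc, Nat.add_comm 1 j] using this)
          (fun j hj => by have := hcoord (j + 1) (by simpa using hj); simpa [Nat.add_assoc, Nat.add_comm 1 j] using this)
        rw [PySem.List.enumerate_cons]
        have hcast : ((s : Int)) + 1 = (((s + 1 : Nat)) : Int) := by push_cast; ring
        by_cases hp : p = cur
        · -- candidate s is in the bucket
          simp only [List.filter_cons, hp, beq_self_eq_true, ite_true, List.map_cons,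
            List.zip_cons_cons, pvFindNode, pvFindMatchA, pvComb, ht0]
          by_cases htk : t = tok
          · simp [htk, hc0]
          · rw [if_neg htk, if_neg (by simp [htk])]
            rw [hcast]; exact hrec
        · simp only [List.filter_cons, List.zip_cons_cons, pvFindNode]
          rw [if_neg (by simp [hp]), if_neg (by simp [hp])]
          rw [hcast]; exact hrec

-- B's direct scan finds nothing when cur is not a parent of any node
theorem pvFindNode_none_of_not_parent (cur tok : Int) :
    ∀ (nodes : List (Int × Int × Int × Int)) (s : Int),
      (∀ n ∈ nodes, n.1 ≠ cur) → pvFindNode nodes s cur tok = none := by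
  intro nodes
  induction nodes with
  | nil => intro s _; rfl
  | cons n rest ih =>
    intro s h
    simp only [pvFindNode]
    rw [if_neg (by simp [h n (by simp)])]
    exact ih (s + 1) (fun m hm => h m (by simp [hm]))

-- Once in_backbone is false, every further match just counts: tau grows by the trace length.
theorem pvWalkA_eq_false (tids : List Int) (pids : List Int) (coords : List (Int × Int))
    (h4 : pids.length ≤ tids.length) (h5 : pids.length ≤ coords.length) :
    ∀ (gt : List Int) (cur k tau : Int),
      pvWalkA (pvBuildChildren pids) tids coords gt cur k tau false
        = (k, tau + ((pvCollectB (pids.zip (tids.zip coords)) gt cur).length : Int)) := by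
  intro gt
  induction gt with
  | nil => intro cur k tau; simp [pvWalkA, pvCollectB]
  | cons tok rest ih =>
    intro cur k tau
    simp only [pvWalkA, pvCollectB, pvBuildChildren_getD]
    have hfe := pvFind_eq tids coords cur tok pids tids coords 0 h4 h5
      (fun j _ => by simp [PySem.List.pyGet?_natCast]) (fun j _ => by simp [PySem.List.pyGet?_natCast])
    simp only [Nat.cast_zero] at hfe
    cases hA : pvFindMatchA tids (((PySem.List.enumerate pids (0:Int)).filter (fun ip => ip.2 == cur)).map (·.1)) tok with
    | none =>
      rw [hA] at hfe; simp only [pvComb] at hfe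
      simp only [← hfe]; simp
    | some c =>
      rw [hA] at hfe; simp only [pvComb] at hfe
      cases hC : PySem.List.pyGet? coords c with
      | none =>
        rw [hC, Option.map_none] at hfe
        simp only [← hfe]
        simp [hC]
      | some be =>
        rw [hC, Option.map_some] at hfe
        simp only [← hfe, hC]
        simp only [if_neg (by simp : ¬(be.2 = 0 ∧ false = true)), ih]
        simp; ring

-- While in_backbone, the result is (k, tau) plus the right fold of the e-trace.
theorem pvWalkA_eq_true (tids : List Int) (pids : List Int) (coords : List (Int × Int))
    (h4 : pids.length ≤ tids.length) (h5 : pids.length ≤ coords.length) :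
    ∀ (gt : List Int) (cur k tau : Int),
      pvWalkA (pvBuildChildren pids) tids coords gt cur k tau true
        = (k + (pvG (pvCollectB (pids.zip (tids.zip coords)) gt cur)).1,
           tau + (pvG (pvCollectB (pids.zip (tids.zip coords)) gt cur)).2) := by
  intro gt
  induction gt with
  | nil => intro cur k tau; simp [pvWalkA, pvCollectB, pvG]
  | cons tok rest ih =>
    intro cur k tau
    simp only [pvWalkA, pvCollectB, pvBuildChildren_getD]
    have hfe := pvFind_eq tids coords cur tok pids tids coords 0 h4 h5
      (fun j _ => by simp [PySem.List.pyGet?_natCast]) (fun j _ => by simp [PySem.List.pyGet?_natCast])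
    simp only [Nat.cast_zero] at hfe
    cases hA : pvFindMatchA tids (((PySem.List.enumerate pids (0:Int)).filter (fun ip => ip.2 == cur)).map (·.1)) tok with
    | none =>
      rw [hA] at hfe; simp only [pvComb] at hfe
      simp only [← hfe]; simp [pvG]
    | some c =>
      rw [hA] at hfe; simp only [pvComb] at hfe
      cases hC : PySem.List.pyGet? coords c with
      | none =>
        rw [hC, Option.map_none] at hfe
        simp only [← hfe]
        simp [hC, pvG]
      | some be =>
        rw [hC, Option.map_some] at hfe
        simp only [← hfe, hC]
        by_cases he : be.2 = 0
        · rw [if_pos (by simp [he]), ih]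
          simp only [pvG, List.foldr_cons, pvStepKT, if_pos he, Prod.mk.injEq]
          exact ⟨by omega, trivial⟩
        · rw [if_neg (by simp [he]), pvWalkA_eq_false tids pids coords h4 h5]
          have hsum := pvG_sum (pvCollectB (pids.zip (tids.zip coords)) rest c)
          simp only [pvG, List.foldr_cons, pvStepKT, if_neg he, Prod.mk.injEq] at *
          constructor
          · simp
          · omega

-- ===== VERDICT (by name: the statement is the Claim_ definition above) =====
theorem walk_extension_for_kt_py_spec : Claim_equal_walk_extension_for_kt_py := by
  intro tids pids coords gt _ hpre
  unfold Spec_walk_extension_for_kt_py walk_extension_for_kt_py walk_extension_for_kt_py_alt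
  by_cases h : tids = [] ∨ gt = []
  · simp [h]
  · simp only [if_neg h]
    rw [List.foldl_reverse]
    rcases hpre with h1 | h2 | h3 | ⟨h4, h5⟩
    · exact absurd (Or.inl h1) h
    · exact absurd (Or.inr h2) h
    · -- no root child: both walks stop at the first token
      cases gt with
      | nil => exact absurd (Or.inr rfl) h
      | cons tok rest =>
        have hnone : pvFindNode (pids.zip (tids.zip coords)) 0 (-1) tok = none := by
          apply pvFindNode_none_of_not_parent
          intro n hn
          have := (List.of_mem_zip hn).1
          intro hc; exact h3 (hc ▸ this)
        have hbucket : (pvBuildChildren pids).getD (-1) [] = [] := by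
          rw [pvBuildChildren_getD]
          rw [List.filter_eq_nil_iff.2]
          · simp
          · intro ip hip
            have h2 : ip.2 ∈ pids := by
              rw [← PySem.List.map_snd_enumerate pids (s := 0)]
              exact List.mem_map.2 ⟨ip, hip, rfl⟩
            simp
            intro hc; exact absurd (hc ▸ h2) h3
        simp [pvWalkA, pvCollectB, pvFindMatchA, hbucket, hnone]
    · rw [pvWalkA_eq_true tids pids coords h4 h5]
      simp [pvG]
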